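-- pv_equiv track=rewrite | github.com/Shezzy-shaibi/DSA_scripts | append_char_to_str.py | append_s_t_method
-- ===== SOURCE A (Python) =====
-- def append_s_t_method(str1, str2):
--     i = j = 0
--     while i <len(str1) and j <len(str2):
--         if str1[i] == str2[j]:
--             i +=1
--             j +=1
--         else:
--             i +=1
--     return len(str2) - j
-- ===== SOURCE B (Python) =====
-- def append_s_t_method(str1, str2):
--     # Index str1 once: for each character, the sorted list of its positions.
--     # Then match str2 greedily by jumping through the index with binary search
--     # instead of rescanning str1 character by character.
--     pos = {}
--     for i, ch in enumerate(str1):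
--         pos.setdefault(ch, []).append(i)
--     need = 0      # smallest str1 position still usable
--     matched = 0
--     for c in str2:
--         lst = pos.get(c)
--         if lst is None or lst[-1] < need:
--             break
--         # binary search: first position in lst that is >= need
--         lo, hi = 0, len(lst)
--         while lo < hi:
--             mid = (lo + hi) // 2
--             if lst[mid] < need:
--                 lo = mid + 1
--             else:
--                 hi = mid
--         need = lst[lo] + 1
--         matched += 1
--     return len(str2) - matched
-- ===== Notes on version B (the rewrite author's own statement) =====
-- stated objective: alternative
-- what changed: Replaces A's character-by-character scan of str1 with a precomputed position index (char -> sorted list of occurrence positions) that is traversed by binary-search jumps while iterating str2.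
import Mathlib
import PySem

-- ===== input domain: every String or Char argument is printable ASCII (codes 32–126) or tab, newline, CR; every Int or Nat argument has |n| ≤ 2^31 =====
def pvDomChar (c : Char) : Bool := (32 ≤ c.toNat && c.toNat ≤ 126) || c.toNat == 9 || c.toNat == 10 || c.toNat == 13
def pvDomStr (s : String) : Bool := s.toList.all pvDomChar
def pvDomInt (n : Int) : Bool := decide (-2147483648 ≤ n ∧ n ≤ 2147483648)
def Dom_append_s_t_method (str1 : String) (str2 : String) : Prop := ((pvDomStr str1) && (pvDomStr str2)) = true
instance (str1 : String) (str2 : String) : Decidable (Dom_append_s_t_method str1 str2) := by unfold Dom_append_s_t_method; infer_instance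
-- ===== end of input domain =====

-- B replaces A's character-by-character scan of str1 with a precomputed position index
-- (char -> sorted list of occurrence positions) traversed by binary-search jumps; same
-- return value, no speed claim.

-- ===== PORT A =====
-- the while loop: i scans str1, j scans str2; returns len(str2) - j, i.e. the
-- length of the unmatched remainder of str2
def loopA : List Char → List Char → Nat
  | [], l2 => l2.length
  | _ :: _, [] => 0
  | a :: l1, b :: l2 => if a == b then loopA l1 l2 else loopA l1 (b :: l2)

def append_s_t_method (str1 : String) (str2 : String) : Int :=
  (loopA str1.toList str2.toList : Int)

-- ===== PORT B =====
-- `for i, ch in enumerate(str1): pos.setdefault(ch, []).append(i)`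
-- (setdefault-then-append is exactly Dict.modify with default []; the positions are the
-- loop counter i, always ≥ 0, carried as Nat)
def buildPos : List Char → Nat → PySem.Dict Char (List Nat) → PySem.Dict Char (List Nat)
  | [], _, d => d
  | ch :: l, i, d => buildPos l (i + 1) (d.modify ch [] (· ++ [i]))

-- the `while lo < hi` binary-search loop; lst[mid] is in range whenever read,
-- ported as getD
def bsearch (lst : List Nat) (need : Nat) (lo hi : Nat) : Nat :=
  if lo < hi then
    let mid := (lo + hi) / 2
    if lst.getD mid 0 < need then bsearch lst need (mid + 1) hi
    else bsearch lst need lo mid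
  else lo
termination_by hi - lo
decreasing_by all_goals omega

-- the `for c in str2` loop; returns `matched`.  `lst[-1]` is in range (every stored
-- list is nonempty), ported as getLastD
def loopB (pos : PySem.Dict Char (List Nat)) : List Char → Nat → Nat
  | [], _ => 0
  | c :: l2, need =>
    match pos.get? c with
    | none => 0
    | some lst =>
      if lst.getLastD 0 < need then 0
      else
        let lo := bsearch lst need 0 lst.length
        1 + loopB pos l2 (lst.getD lo 0 + 1)

def append_s_t_method_alt (str1 : String) (str2 : String) : Int :=
  (str2.toList.length : Int) -
    (loopB (buildPos str1.toList 0 PySem.Dict.empty) str2.toList 0 : Int)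

-- ===== PRECONDITION & SPEC =====
def Spec_append_s_t_method (str1 : String) (str2 : String) (out : Int) : Prop := out = append_s_t_method_alt str1 str2
instance (str1 : String) (str2 : String) (out : Int) : Decidable (Spec_append_s_t_method str1 str2 out) := by unfold Spec_append_s_t_method; infer_instance

-- ===== CLAIM (what is proved, stated in full; the proofs are below) =====
def Claim_equal_append_s_t_method : Prop := ∀ (str1 : String) (str2 : String), Dom_append_s_t_method str1 str2 → Spec_append_s_t_method str1 str2 (append_s_t_method str1 str2)

-- ===== LEMMAS AND PROOFS =====

-- specification of the position index: the occurrence positions of c in l, offset by i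
def occ (c : Char) : List Char → Nat → List Nat
  | [], _ => []
  | a :: l, i => if a = c then i :: occ c l (i + 1) else occ c l (i + 1)

-- first occurrence position of c in l1 at or after n (what A's inner scan finds)
def firstOccFrom (c : Char) (l1 : List Char) (n : Nat) : Option Nat :=
  (List.findIdx? (· = c) (l1.drop n)).map (· + n)

-- A-side greedy rephrased with an explicit start index into str1
def matchedIdx (l1 : List Char) : List Char → Nat → Nat
  | [], _ => 0
  | c :: l2, n =>
    match firstOccFrom c l1 n with
    | none => 0
    | some k => 1 + matchedIdx l1 l2 (k + 1)

lemma occ_ge (c : Char) (l : List Char) (i : Nat) : ∀ x ∈ occ c l i, i ≤ x := by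
  induction l generalizing i with
  | nil => simp [occ]
  | cons a l ih =>
    intro x hx
    by_cases h : a = c <;> simp [occ, h] at hx
    · rcases hx with rfl | hx
      · exact le_refl _
      · exact le_trans (Nat.le_succ _) (ih _ x hx)
    · exact le_trans (Nat.le_succ _) (ih _ x hx)

lemma occ_pairwise (c : Char) (l : List Char) (i : Nat) :
    (occ c l i).Pairwise (· < ·) := by
  induction l generalizing i with
  | nil => simp [occ]
  | cons a l ih =>
    by_cases h : a = c <;> simp [occ, h]
    · exact ⟨fun x hx => lt_of_lt_of_le (Nat.lt_succ_self i) (occ_ge c l (i+1) x hx), ih _⟩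
    · exact ih _

lemma occ_eq_nil_iff (c : Char) (l : List Char) (i : Nat) :
    occ c l i = [] ↔ c ∉ l := by
  induction l generalizing i with
  | nil => simp [occ]
  | cons a l ih =>
    by_cases h : a = c
    · subst h; simp [occ]
    · simp only [occ, if_neg h, ih, List.mem_cons]
      have : ¬ c = a := fun hc => h hc.symm
      tauto

lemma occ_head_findIdx (c : Char) (m : List Char) (i : Nat) :
    (occ c m i).head? = (List.findIdx? (· = c) m).map (· + i) := by
  induction m generalizing i with
  | nil => simp [occ]
  | cons a m ih =>
    by_cases h : a = c
    · simp [occ, h, List.findIdx?_cons]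
    · simp [occ, h, List.findIdx?_cons, ih (i + 1)]
      cases hf : List.findIdx? (· = c) m <;> simp
      omega

lemma occ_drop (c : Char) (l : List Char) (i n : Nat) :
    occ c (l.drop n) (i + n) = (occ c l i).filter (fun x => decide (i + n ≤ x)) := by
  induction l generalizing i n with
  | nil => simp [occ]
  | cons a l ih =>
    cases n with
    | zero =>
      simp only [List.drop_zero, Nat.add_zero]
      symm
      rw [List.filter_eq_self]
      intro x hx
      exact decide_eq_true (occ_ge c (a :: l) i x hx)
    | succ m =>
      have key : occ c (l.drop m) (i + (m + 1)) =
          (occ c l (i + 1)).filter (fun x => decide (i + (m + 1) ≤ x)) := by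
        have := ih (i + 1) m
        rw [show i + 1 + m = i + (m + 1) by omega] at this
        exact this
      by_cases h : a = c
      · simp only [List.drop_succ_cons, occ, if_pos h, List.filter_cons]
        rw [key]
        have hni : ¬ (i + (m + 1) ≤ i) := by omega
        simp [hni]
      · simp only [List.drop_succ_cons, occ, if_neg h]
        exact key

-- A's scan step: no occurrence from n → the whole suffix is burnt
lemma loopA_of_not_mem (m : List Char) (c : Char) (l2 : List Char) (h : c ∉ m) :
    loopA m (c :: l2) = l2.length + 1 := by
  induction m with
  | nil => simp [loopA]
  | cons a m ih =>
    have hac : ¬ (a == c) = true := by simp; rintro rfl; exact h (List.mem_cons_self)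
    simp only [loopA, if_neg hac]
    exact ih (fun hc => h (List.mem_cons_of_mem _ hc))

lemma loopA_findIdx (m : List Char) (c : Char) (l2 : List Char) (j : Nat)
    (h : List.findIdx? (· = c) m = some j) :
    loopA m (c :: l2) = loopA (m.drop (j + 1)) l2 := by
  induction m generalizing j with
  | nil => simp at h
  | cons a m ih =>
    rw [List.findIdx?_cons] at h
    by_cases hac : a = c
    · simp [hac] at h
      subst h
      simp [loopA, hac]
    · simp [hac] at h
      obtain ⟨j', hj', rfl⟩ := h
      have : ¬ (a == c) = true := by simpa using hac
      simp only [loopA, if_neg this, List.drop_succ_cons]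
      exact ih j' hj'

lemma loopA_add_matchedIdx (l2 l1 : List Char) :
    ∀ n, loopA (l1.drop n) l2 + matchedIdx l1 l2 n = l2.length := by
  induction l2 with
  | nil =>
    intro n
    cases h : l1.drop n <;> simp [loopA, matchedIdx]
  | cons c l2 ih =>
    intro n
    cases hf : List.findIdx? (· = c) (l1.drop n) with
    | none =>
      have hnm : c ∉ l1.drop n := by
        intro hc
        have := List.findIdx?_eq_none_iff.mp hf c hc
        simp at this
      rw [loopA_of_not_mem _ _ _ hnm]
      simp [matchedIdx, firstOccFrom, hf]
    | some j =>
      rw [loopA_findIdx (l1.drop n) c l2 j hf]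
      simp only [matchedIdx, firstOccFrom, hf, Option.map_some]
      have hd : (l1.drop n).drop (j + 1) = l1.drop (j + n + 1) := by
        rw [List.drop_drop]; ring_nf
      rw [hd]
      have := ih (j + n + 1)
      simp only [List.length_cons]
      omega

-- binary-search correctness on a strictly increasing list
lemma getD_lt_getD (lst : List Nat) (h : lst.Pairwise (· < ·)) (i j : Nat)
    (hij : i < j) (hj : j < lst.length) : lst.getD i 0 < lst.getD j 0 := by
  rw [List.getD_eq_getElem _ _ (lt_trans hij hj), List.getD_eq_getElem _ _ hj]
  exact (List.pairwise_iff_getElem.mp h) i j (lt_trans hij hj) hj hij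

lemma bsearch_spec (lst : List Nat) (n : Nat) (hp : lst.Pairwise (· < ·)) :
    ∀ d lo hi, hi - lo ≤ d → lo ≤ hi → hi ≤ lst.length →
    (∀ i, i < lo → lst.getD i 0 < n) →
    (∀ i, hi ≤ i → i < lst.length → n ≤ lst.getD i 0) →
    (∀ i, i < bsearch lst n lo hi → lst.getD i 0 < n) ∧
    (∀ i, bsearch lst n lo hi ≤ i → i < lst.length → n ≤ lst.getD i 0) ∧
    lo ≤ bsearch lst n lo hi ∧ bsearch lst n lo hi ≤ hi := by
  intro d
  induction d with
  | zero =>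
    intro lo hi hd hlh hhl hlow hhigh
    have : hi = lo := by omega
    subst this
    rw [bsearch]
    simp only [lt_irrefl, if_false]
    exact ⟨hlow, hhigh, le_refl _, le_refl _⟩
  | succ d ih =>
    intro lo hi hd hlh hhl hlow hhigh
    rw [bsearch]
    by_cases hlt : lo < hi
    · simp only [if_pos hlt]
      set mid := (lo + hi) / 2 with hmid
      have hmlo : lo ≤ mid := by omega
      have hmhi : mid < hi := by omega
      by_cases hv : lst.getD mid 0 < n
      · simp only [if_pos hv]
        have hlow' : ∀ i, i < mid + 1 → lst.getD i 0 < n := by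
          intro i hi'
          rcases Nat.lt_or_ge i mid with h3 | h3
          · exact lt_trans (getD_lt_getD lst hp i mid h3 (by omega)) hv
          · have : i = mid := by omega
            subst this; exact hv
        obtain ⟨p1, p2, p3, p4⟩ := ih (mid + 1) hi (by omega) (by omega) hhl hlow' hhigh
        exact ⟨p1, p2, by omega, p4⟩
      · simp only [if_neg hv]
        have hhigh' : ∀ i, mid ≤ i → i < lst.length → n ≤ lst.getD i 0 := by
          intro i hmi hil
          rcases Nat.eq_or_lt_of_le hmi with h2 | h2
          · subst h2; omega
          · exact le_trans (by omega) (le_of_lt (getD_lt_getD lst hp mid i h2 hil))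
        obtain ⟨p1, p2, p3, p4⟩ := ih lo mid (by omega) hmlo (by omega) hlow hhigh'
        exact ⟨p1, p2, p3, by omega⟩
    · simp only [if_neg hlt]
      have : hi = lo := by omega
      subst this
      exact ⟨hlow, hhigh, le_refl _, le_refl _⟩

lemma pairwise_le_getLastD (lst : List Nat) (h : lst.Pairwise (· < ·)) :
    ∀ x ∈ lst, x ≤ lst.getLastD 0 := by
  induction lst with
  | nil => simp
  | cons a t ih =>
    intro x hx
    cases t with
    | nil => simp at hx; simp [hx]
    | cons b t' =>
      rcases List.mem_cons.mp hx with rfl | hx'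
      · have hb := (List.pairwise_cons.mp h).1 b List.mem_cons_self
        have hlast := ih (List.pairwise_cons.mp h).2 b List.mem_cons_self
        calc x ≤ b := le_of_lt hb
          _ ≤ (b :: t').getLastD 0 := hlast
          _ = ((x :: b :: t').getLastD 0) := by simp
      · have := ih (List.pairwise_cons.mp h).2 x hx'
        calc x ≤ (b :: t').getLastD 0 := this
          _ = ((a :: b :: t').getLastD 0) := by simp

-- the built dictionary realises occ
lemma buildPos_getD (l : List Char) (i : Nat) (d : PySem.Dict Char (List Nat)) (c : Char) :
    (buildPos l i d).getD c [] = d.getD c [] ++ occ c l i := by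
  induction l generalizing i d with
  | nil => simp [buildPos, occ]
  | cons a l ih =>
    simp only [buildPos, occ]
    rw [ih, PySem.Dict.getD_modify]
    by_cases h : a = c
    · subst h; simp
    · have : ¬ c = a := fun hc => h hc.symm
      simp [h, this]

lemma buildPos_contains (l : List Char) (i : Nat) (d : PySem.Dict Char (List Nat)) (c : Char) :
    (buildPos l i d).contains c = (decide (c ∈ l) || d.contains c) := by
  induction l generalizing i d with
  | nil => simp [buildPos]
  | cons a l ih =>
    simp only [buildPos]
    rw [ih, PySem.Dict.contains_modify]
    by_cases h : c = a
    · simp [h]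
    · have hba : (c == a) = false := beq_eq_false_iff_ne.mpr h
      simp [hba, h]

-- B's loop computes the indexed greedy
lemma loopB_eq_matchedIdx (l1 : List Char) (l2 : List Char) :
    ∀ n, loopB (buildPos l1 0 PySem.Dict.empty) l2 n = matchedIdx l1 l2 n := by
  induction l2 with
  | nil => intro n; simp [loopB, matchedIdx]
  | cons c l2 ih =>
    intro n
    set pos := buildPos l1 0 PySem.Dict.empty with hpos
    have hcont : pos.contains c = decide (c ∈ l1) := by
      rw [hpos, buildPos_contains]; simp
    have hgetD : pos.getD c [] = occ c l1 0 := by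
      rw [hpos, buildPos_getD]; simp
    have hfirst : firstOccFrom c l1 n = ((occ c l1 0).filter (fun x => decide (n ≤ x))).head? := by
      unfold firstOccFrom
      rw [← occ_head_findIdx c (l1.drop n) n]
      have := occ_drop c l1 0 n
      simp only [Nat.zero_add] at this
      rw [this]
    by_cases hmem : c ∈ l1
    · have hsome : ∃ lst, pos.get? c = some lst := by
        have hc : pos.contains c = true := by rw [hcont]; simp [hmem]
        rw [PySem.Dict.contains_eq_isSome_get?] at hc
        exact Option.isSome_iff_exists.mp hc
      obtain ⟨lst, hlst⟩ := hsome
      have hlstv : lst = occ c l1 0 := by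
        rw [← hgetD, PySem.Dict.getD_eq_get?_getD, hlst]
        rfl
      have hpair : lst.Pairwise (· < ·) := hlstv ▸ occ_pairwise c l1 0
      simp only [loopB, hlst]
      by_cases hlast : lst.getLastD 0 < n
      · -- every occurrence < n : the filtered list is empty, firstOccFrom = none
        have hfe : (occ c l1 0).filter (fun x => decide (n ≤ x)) = [] := by
          rw [List.filter_eq_nil_iff]
          intro x hx
          have := pairwise_le_getLastD lst hpair x (hlstv ▸ hx)
          simp; omega
        simp only [if_pos hlast, matchedIdx, hfirst, hfe, List.head?_nil]
      · -- lst.getLastD ≥ n : the binary search finds the first occurrence ≥ n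
        have hne : lst ≠ [] := by
          intro h; rw [h] at hlstv
          exact (occ_eq_nil_iff c l1 0).mp hlstv.symm hmem
        have hlastmem : lst.getLastD 0 ∈ lst := by
          rw [List.getLastD_eq_getLast?, List.getLast?_eq_some_getLast hne]
          exact List.getLast_mem hne
        obtain ⟨hbelow, habove, -, -⟩ :=
          bsearch_spec lst n hpair lst.length 0 lst.length (by omega) (by omega) (le_refl _)
            (fun i hi => absurd hi (by omega)) (fun i h1 h2 => absurd (lt_of_le_of_lt h1 h2) (by omega))
        set r := bsearch lst n 0 lst.length with hr
        have hrlen : r < lst.length := by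
          rcases Nat.lt_or_ge r lst.length with h | h
          · exact h
          · exfalso
            obtain ⟨j, hj, hje⟩ := List.mem_iff_getElem.mp hlastmem
            have := hbelow j (by omega)
            rw [List.getD_eq_getElem _ _ hj, hje] at this
            omega
        -- head of the filtered list is lst[r]
        have hhead : (lst.filter (fun x => decide (n ≤ x))).head? = some (lst.getD r 0) := by
          conv_lhs => rw [show lst = lst.take r ++ lst[r] :: lst.drop (r + 1) by
            rw [List.getElem_cons_drop, List.take_append_drop]]
          rw [List.filter_append]
          have htake : (lst.take r).filter (fun x => decide (n ≤ x)) = [] := by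
            rw [List.filter_eq_nil_iff]
            intro x hx
            obtain ⟨j, hj, hje⟩ := List.mem_iff_getElem.mp hx
            have hjr : j < r := by
              have := hj; simp [List.length_take] at this; omega
            have hlt := hbelow j hjr
            rw [List.getD_eq_getElem _ _ (by omega)] at hlt
            rw [List.getElem_take] at hje
            simp; omega
          have hrn : n ≤ lst[r] := by
            have := habove r (le_refl _) hrlen
            rwa [List.getD_eq_getElem _ _ hrlen] at this
          rw [htake, List.nil_append, List.filter_cons,
            List.getD_eq_getElem _ _ hrlen]
          simp [hrn]
        simp only [if_neg hlast, matchedIdx, hfirst, ← hlstv, hhead]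
        rw [ih]
    · -- c not in l1 at all: get? = none on B's side, no occurrence on A's side
      have hnone : pos.get? c = none := by
        have hc : pos.contains c = false := by rw [hcont]; simp [hmem]
        rw [PySem.Dict.contains_eq_isSome_get?] at hc
        simpa using hc
      have hfe : occ c l1 0 = [] := (occ_eq_nil_iff c l1 0).mpr hmem
      simp [loopB, hnone, matchedIdx, hfirst, hfe]

-- ===== VERDICT (by name: the statement is the Claim_ definition above) =====
theorem append_s_t_method_spec : Claim_equal_append_s_t_method := by
  intro str1 str2 _
  unfold Spec_append_s_t_method append_s_t_method append_s_t_method_alt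
  rw [loopB_eq_matchedIdx]
  have h := loopA_add_matchedIdx str2.toList str1.toList 0
  simp only [List.drop_zero] at h
  omega
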